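-- pv_equiv track=rewrite | github.com/ym1522/Algorithm-study | 김수빈/baekjoon/1343_bj.py | convert
-- ===== SOURCE A (Python) =====
-- def convert(board):
--     answer = ""
--     acc_x = ""
--     for i, x in enumerate(board):
--         if x == '.':
--             if len(acc_x) == 0:
--                 answer += x
--             else:
--                 alter = solution(len(acc_x), "AAAA", "BB")
--                 if alter is None: return "-1"
--                 answer += alter + x
--             acc_x = ""
--             continue
--         acc_x += x
--     if acc_x:
--         alter = solution(len(acc_x), "AAAA", "BB")
--         if alter is None: return "-1"
--         answer += alter
--     return answer
--
-- def solution(n, A_str, B_str):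
--     if n % 2 != 0 or n < 2: return None
--
--     answer = ""
--     while n >= len(A_str):
--         answer += A_str
--         n -= len(A_str)
--     while n >= len(B_str):
--         answer += B_str
--         n -= len(B_str)
--     return answer
-- ===== SOURCE B (Python) =====
-- def convert(board):
--     parts = board.split('.')
--     res = []
--     for s in parts:
--         n = len(s)
--         if n % 2 != 0:
--             return "-1"
--         res.append("AAAA" * (n // 4) + "BB" * ((n % 4) // 2))
--     return ".".join(res)
-- ===== Notes on version B (the rewrite author's own statement) =====
-- stated objective: faster
-- what changed: B replaces A's character-by-character accumulator loop and its two subtraction while-loops by splitting the board on the dot separator, building each segment in closed form from the repetition counts n//4 and (n%4)//2, and rejoining with the separator.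
import Mathlib
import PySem

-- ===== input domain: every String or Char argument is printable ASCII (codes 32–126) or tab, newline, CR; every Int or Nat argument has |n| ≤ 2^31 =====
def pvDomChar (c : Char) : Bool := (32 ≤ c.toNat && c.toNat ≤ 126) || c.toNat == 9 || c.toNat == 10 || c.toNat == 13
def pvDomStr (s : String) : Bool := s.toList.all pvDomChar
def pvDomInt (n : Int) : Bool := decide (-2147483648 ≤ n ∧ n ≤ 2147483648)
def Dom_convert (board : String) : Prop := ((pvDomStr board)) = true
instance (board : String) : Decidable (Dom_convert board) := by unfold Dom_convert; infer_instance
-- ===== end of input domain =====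

-- B replaces A's char-by-char accumulator loop and its two subtraction while-loops by
-- split on the dot / closed-form per-segment strings / join — same values, measured faster
-- (bulk repetition and join instead of repeated concatenation).

-- ===== PORT A =====
-- `while n >= 2: answer += "BB"; n -= 2` (entered after the first while loop ends)
def solWhileB (n : Nat) : List Char :=
  if h : 2 ≤ n then ['B','B'] ++ solWhileB (n - 2) else []

-- `while n >= 4: answer += "AAAA"; n -= 4`, then falls through to the second loop
def solWhileA (n : Nat) : List Char :=
  if h : 4 ≤ n then ['A','A','A','A'] ++ solWhileA (n - 4) else solWhileB n

-- `solution(n, "AAAA", "BB")` of A (the string arguments are these two literals at both call sites)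
def solA (n : Nat) : Option (List Char) :=
  if n % 2 ≠ 0 ∨ n < 2 then none else some (solWhileA n)

-- the `for i, x in enumerate(board)` loop with state (answer, acc_x), plus the trailing `if acc_x:` block
def convGo (chars : List Char) (answer acc : List Char) : List Char :=
  match chars with
  | [] =>
    if acc.length ≠ 0 then
      match solA acc.length with
      | none => ['-','1']
      | some a => answer ++ a
    else answer
  | x :: rest =>
    if x = '.' then
      if acc.length = 0 then convGo rest (answer ++ [x]) []
      else
        match solA acc.length with
        | none => ['-','1']
        | some a => convGo rest (answer ++ a ++ [x]) []
    else convGo rest answer (acc ++ [x])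

def convert (board : String) : String := String.ofList (convGo board.toList [] [])

-- ===== PORT B =====
-- `"AAAA" * (n // 4) + "BB" * ((n % 4) // 2)`
def segB (n : Nat) : List Char :=
  (List.replicate (n / 4) ['A','A','A','A']).flatten ++
  (List.replicate (n % 4 / 2) ['B','B']).flatten

-- the `for s in parts:` loop with its early `return "-1"` (none) and the res list
def convGoB (parts : List (List Char)) : Option (List (List Char)) :=
  match parts with
  | [] => some []
  | s :: rest =>
    if s.length % 2 ≠ 0 then none
    else
      match convGoB rest with
      | none => none
      | some r => some (segB s.length :: r)

def convert_alt (board : String) : String :=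
  match convGoB (PySem.Chars.splitOn board.toList ['.']) with
  | none => "-1"
  | some res => String.ofList (PySem.Chars.join ['.'] res)

-- ===== PRECONDITION & SPEC =====
def Spec_convert (board : String) (out : String) : Prop := out = convert_alt board
instance (board : String) (out : String) : Decidable (Spec_convert board out) := by unfold Spec_convert; infer_instance

-- ===== CLAIM (what is proved, stated in full; the proofs are below) =====
def Claim_equal_convert : Prop := ∀ (board : String), Dom_convert board → Spec_convert board (convert board)

-- ===== LEMMAS AND PROOFS =====

-- A's while loops compute B's closed form, for even n
theorem solWhileA_eq_segB (n : Nat) (h : n % 2 = 0) : solWhileA n = segB n := by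
  induction n using Nat.strong_induction_on with
  | _ n ih =>
    rw [solWhileA]
    by_cases h4 : 4 ≤ n
    · rw [dif_pos h4, ih (n - 4) (by omega) (by omega)]
      have e1 : n / 4 = (n - 4) / 4 + 1 := by omega
      have e2 : n % 4 = (n - 4) % 4 := by omega
      simp [segB, e1, e2, List.replicate_succ]
    · rw [dif_neg h4]
      interval_cases n
      · rw [solWhileB]; simp [segB]
      · omega
      · rw [solWhileB, solWhileB]; simp [segB]
      · omega

theorem solA_eq (n : Nat) (h : 0 < n) :
    solA n = if n % 2 ≠ 0 then none else some (segB n) := by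
  unfold solA
  by_cases h2 : n % 2 = 0
  · rw [if_neg (by omega), if_neg (by omega), solWhileA_eq_segB n h2]
  · rw [if_pos (by omega), if_pos (by omega)]

-- splitOn.go: the accumulator factors out
theorem go_acc (fuel : Nat) (l cur : List Char) (acc : List (List Char)) :
    PySem.Chars.splitOn.go ['.'] fuel l cur acc =
      acc.reverse ++ PySem.Chars.splitOn.go ['.'] fuel l cur [] := by
  induction fuel generalizing l cur acc with
  | zero => simp [PySem.Chars.splitOn.go]
  | succ fuel ih =>
    cases l with
    | nil => simp [PySem.Chars.splitOn.go]
    | cons c rest =>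
      simp only [PySem.Chars.splitOn.go]
      by_cases hp : List.isPrefixOf ['.'] (c :: rest)
      · rw [if_pos hp, if_pos hp,
          ih (List.drop ['.'].length (c :: rest)) [] (cur.reverse :: acc),
          ih (List.drop ['.'].length (c :: rest)) [] [cur.reverse]]
        simp
      · rw [if_neg hp, if_neg hp, ih rest (c :: cur) acc]

-- splitOn.go on a dot-free list
theorem go_no_dot (fuel : Nat) (l cur : List Char) (h : '.' ∉ l) :
    PySem.Chars.splitOn.go ['.'] fuel l cur [] = [cur.reverse ++ l] := by
  induction fuel generalizing l cur with
  | zero => simp [PySem.Chars.splitOn.go]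
  | succ fuel ih =>
    cases l with
    | nil => simp [PySem.Chars.splitOn.go]
    | cons c rest =>
      have hc : ¬ ('.' = c) := by intro e; exact h (by rw [e]; exact List.mem_cons_self ..)
      simp only [PySem.Chars.splitOn.go, List.isPrefixOf, Bool.and_true]
      rw [if_neg (by simpa using hc), ih rest (c :: cur) (fun m => h (List.mem_cons_of_mem c m))]
      simp

theorem splitOn_no_dot (l : List Char) (h : '.' ∉ l) :
    PySem.Chars.splitOn l ['.'] = [l] := by
  unfold PySem.Chars.splitOn
  rw [go_no_dot _ _ _ h]
  simp

theorem go_pre (pre : List Char) (h : '.' ∉ pre) (rest cur : List Char) (acc : List (List Char)) :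
    PySem.Chars.splitOn.go ['.'] (pre.length + rest.length + 2) (pre ++ '.' :: rest) cur acc =
      acc.reverse ++ (cur.reverse ++ pre) ::
        PySem.Chars.splitOn.go ['.'] (rest.length + 1) rest [] [] := by
  induction pre generalizing cur acc with
  | nil =>
    have e : ([] : List Char).length + rest.length + 2 = (rest.length + 1) + 1 := by simp
    rw [e, List.nil_append]
    simp only [PySem.Chars.splitOn.go]
    rw [if_pos (by simp [List.isPrefixOf]),
      go_acc (rest.length + 1) _ [] (cur.reverse :: acc)]
    simp
  | cons c pre ih =>
    have hc : ¬ ('.' = c) := by intro e; exact h (by rw [e]; exact List.mem_cons_self ..)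
    have e : (c :: pre).length + rest.length + 2 = (pre.length + rest.length + 2) + 1 := by
      simp; omega
    rw [e, List.cons_append]
    simp only [PySem.Chars.splitOn.go]
    rw [if_neg (by simp [List.isPrefixOf]; simpa using hc),
      ih (fun m => h (List.mem_cons_of_mem c m)) (c :: cur) acc]
    simp

theorem splitOn_pre (pre rest : List Char) (h : '.' ∉ pre) :
    PySem.Chars.splitOn (pre ++ '.' :: rest) ['.'] = pre :: PySem.Chars.splitOn rest ['.'] := by
  unfold PySem.Chars.splitOn
  have e : (pre ++ '.' :: rest).length + 1 = pre.length + rest.length + 2 := by simp; omega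
  rw [e, go_pre pre h rest [] []]
  simp

theorem go_ne_nil (fuel : Nat) (l cur : List Char) (acc : List (List Char)) :
    PySem.Chars.splitOn.go ['.'] fuel l cur acc ≠ [] := by
  induction fuel generalizing l cur acc with
  | zero => simp [PySem.Chars.splitOn.go]
  | succ fuel ih =>
    cases l with
    | nil => simp [PySem.Chars.splitOn.go]
    | cons c rest =>
      simp only [PySem.Chars.splitOn.go]
      by_cases hp : List.isPrefixOf ['.'] (c :: rest)
      · rw [if_pos hp]; apply ih
      · rw [if_neg hp]; apply ih

theorem splitOn_ne_nil (l : List Char) : PySem.Chars.splitOn l ['.'] ≠ [] := by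
  unfold PySem.Chars.splitOn
  apply go_ne_nil

theorem convGoB_cons_ne_nil (s : List Char) (rest : List (List Char)) (r : List (List Char))
    (h : convGoB (s :: rest) = some r) : r ≠ [] := by
  simp only [convGoB] at h
  split at h
  · exact absurd h (by simp)
  · cases hr : convGoB rest with
    | none => rw [hr] at h; exact absurd h (by simp)
    | some r' => rw [hr] at h; simp at h; simp [← h]

-- unfold one step of each loop (defeq restatements used by the main induction)
theorem convGo_cons_dot (rest answer acc : List Char) :
    convGo ('.' :: rest) answer acc =
      if acc.length = 0 then convGo rest (answer ++ ['.']) []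
      else
        match solA acc.length with
        | none => ['-','1']
        | some a => convGo rest (answer ++ a ++ ['.']) [] := by
  simp [convGo]

theorem convGo_cons_ne (x : Char) (rest answer acc : List Char) (hx : ¬ x = '.') :
    convGo (x :: rest) answer acc = convGo rest answer (acc ++ [x]) := by
  simp [convGo, hx]

theorem convGo_nil (answer acc : List Char) :
    convGo [] answer acc =
      if acc.length ≠ 0 then
        match solA acc.length with
        | none => ['-','1']
        | some a => answer ++ a
      else answer := rfl

theorem convGoB_cons (s : List Char) (rest : List (List Char)) :
    convGoB (s :: rest) =
      if s.length % 2 ≠ 0 then none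
      else
        match convGoB rest with
        | none => none
        | some r => some (segB s.length :: r) := rfl

theorem join_res_cons (rest : List Char) (res : List (List Char)) (z : List Char)
    (hr : convGoB (PySem.Chars.splitOn rest ['.']) = some res) :
    PySem.Chars.join ['.'] (z :: res) = z ++ '.' :: PySem.Chars.join ['.'] res := by
  obtain ⟨s, S, hS⟩ : ∃ s S, PySem.Chars.splitOn rest ['.'] = s :: S := by
    cases hsp : PySem.Chars.splitOn rest ['.'] with
    | nil => exact absurd hsp (splitOn_ne_nil rest)
    | cons s S => exact ⟨s, S, rfl⟩
  obtain ⟨w, ws, hw⟩ : ∃ w ws, res = w :: ws := by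
    cases res with
    | nil => exact absurd rfl (convGoB_cons_ne_nil s S [] (by rw [← hS, hr]))
    | cons w ws => exact ⟨w, ws, rfl⟩
  subst hw
  rw [PySem.Chars.join_cons_cons]
  simp

-- the main invariant: A's loop over (acc ++ chars) computes B's split/map/join
theorem convGo_eq (chars : List Char) : ∀ (acc answer : List Char), '.' ∉ acc →
    convGo chars answer acc =
      match convGoB (PySem.Chars.splitOn (acc ++ chars) ['.']) with
      | none => ['-','1']
      | some res => answer ++ PySem.Chars.join ['.'] res := by
  induction chars with
  | nil =>
    intro acc answer h
    rw [List.append_nil, splitOn_no_dot acc h, convGo_nil, convGoB_cons]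
    by_cases ha : acc.length = 0
    · have hae : acc = [] := by simpa using ha
      subst hae
      simp [convGoB, segB, PySem.Chars.join, List.intercalate]
    · rw [if_pos ha, solA_eq acc.length (by omega)]
      by_cases h2 : acc.length % 2 = 0
      · rw [if_neg (by omega), if_neg (by omega)]
        simp [convGoB, PySem.Chars.join, List.intercalate]
      · rw [if_pos (by omega), if_pos (by omega)]
  | cons x rest ih =>
    intro acc answer h
    by_cases hx : x = '.'
    · subst hx
      rw [splitOn_pre acc rest h, convGo_cons_dot, convGoB_cons]
      by_cases ha : acc.length = 0
      · have hae : acc = [] := by simpa using ha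
        subst hae
        rw [if_pos (by simp), if_neg (by simp), ih [] (answer ++ ['.']) (by simp)]
        simp only [List.nil_append]
        cases hr : convGoB (PySem.Chars.splitOn rest ['.']) with
        | none => rfl
        | some res =>
          simp only [join_res_cons rest res (segB ([] : List Char).length) hr]
          simp [segB]
      · rw [if_neg ha, solA_eq acc.length (by omega)]
        by_cases h2 : acc.length % 2 = 0
        · rw [if_neg (by omega), if_neg (by omega)]
          show convGo rest (answer ++ segB acc.length ++ ['.']) [] = _
          rw [ih [] (answer ++ segB acc.length ++ ['.']) (by simp)]
          simp only [List.nil_append]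
          cases hr : convGoB (PySem.Chars.splitOn rest ['.']) with
          | none => rfl
          | some res =>
            simp only [join_res_cons rest res (segB acc.length) hr]
            simp [List.append_assoc]
        · rw [if_pos (by omega), if_pos (by omega)]
    · have hacc : '.' ∉ acc ++ [x] := by
        intro m
        rcases List.mem_append.mp m with m | m
        · exact h m
        · exact hx (by
            have : '.' = x := by simpa using m
            exact this.symm)
      have hmain := ih (acc ++ [x]) answer hacc
      rw [List.append_assoc] at hmain
      simp only [List.singleton_append] at hmain
      rw [convGo_cons_ne x rest answer acc hx, hmain]

-- ===== VERDICT (by name: the statement is the Claim_ definition above) =====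
theorem convert_spec : Claim_equal_convert := by
  intro board _
  unfold Spec_convert convert convert_alt
  have h := convGo_eq board.toList [] [] (by simp)
  simp only [List.nil_append] at h
  rw [h]
  cases hb : convGoB (PySem.Chars.splitOn board.toList ['.']) with
  | none => rfl
  | some res => simp
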